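-- pv_equiv track=rewrite | github.com/memer-policy/memer-policy.github.io | utils.py | get_bin_search_keyframes
-- ===== SOURCE A (Python) =====
-- from typing import List, Optional, Dict, Any
--
-- def get_bin_search_keyframes(actions: List[str]) -> List[int]:
--     """
--     Get keyframe indices with bin search-specific rules per action segment:
--     - If action starts with "look": use the last index of the segment
--     - Otherwise: do not append any keyframe for the segment
--     """
--     if not actions:
--         return []
--
--     keyframe_indices: List[int] = []
--
--     # find the first non-None action
--     i = 0
--     while i < len(actions) and (actions[i] == "None" or actions[i] is None):
--         i += 1
--
--     while i < len(actions):
--         action = actions[i]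
--         if action == "None" or action is None:
--             i += 1
--             continue
--
--         j = i + 1
--         while j < len(actions) and actions[j] == action:
--             j += 1
--         segment_end = j - 1
--
--         action_text = action if isinstance(action, str) else str(action)
--
--         if action_text.lower().startswith("look"):
--             keyframe_indices.append(segment_end)
--
--         i = j
--
--     return keyframe_indices
-- ===== SOURCE B (Python) =====
-- def get_bin_search_keyframes(actions):
--     """One-pass comprehension: an index i is a keyframe iff it ends a run of
--     consecutive equal actions (next element differs or i is last) and the
--     action there is a non-"None" string starting with "look" (case-insensitive)."""
--     n = len(actions)
--     return [i for i in range(n)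
--             if (i == n - 1 or actions[i + 1] != actions[i])
--             and actions[i] != "None" and actions[i] is not None
--             and actions[i].lower().startswith("look")]
-- ===== Notes on version B (the rewrite author's own statement) =====
-- stated objective: simpler
-- what changed: Replaces A's nested while-loop segment scanning (skip-None prologue, inner run-extension loop) with a single comprehension over indices: an index is kept iff it is the last of a run (next element differs or end of list) and its action passes the look test.
import Mathlib
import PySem

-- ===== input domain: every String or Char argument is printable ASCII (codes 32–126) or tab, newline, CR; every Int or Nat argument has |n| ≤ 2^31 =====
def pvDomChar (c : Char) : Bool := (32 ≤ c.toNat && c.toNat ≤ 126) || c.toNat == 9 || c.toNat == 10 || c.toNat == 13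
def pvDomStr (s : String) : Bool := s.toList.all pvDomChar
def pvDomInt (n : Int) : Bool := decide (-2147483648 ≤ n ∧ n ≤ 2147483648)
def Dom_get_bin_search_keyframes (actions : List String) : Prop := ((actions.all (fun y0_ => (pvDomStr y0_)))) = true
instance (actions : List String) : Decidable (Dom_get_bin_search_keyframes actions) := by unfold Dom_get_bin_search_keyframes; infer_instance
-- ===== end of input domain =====

-- B replaces A's nested while-loop segment scanning with a single filter over
-- indices (last-of-run test); objective: simpler. Equal return values on all inputs.

-- ===== PORT A =====
-- skip prologue: while i < len(actions) and actions[i] == "None": i += 1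
def pvSkipNone (actions : List String) (i : Nat) : Nat :=
  if h : i < actions.length ∧ actions.getD i "" = "None" then
    pvSkipNone actions (i + 1)
  else i
termination_by actions.length - i
decreasing_by omega

-- inner while: while j < len(actions) and actions[j] == action: j += 1
def pvSegEnd (actions : List String) (action : String) (j : Nat) : Nat :=
  if h : j < actions.length ∧ actions.getD j "" = action then
    pvSegEnd actions action (j + 1)
  else j
termination_by actions.length - j
decreasing_by omega

theorem pvSegEnd_ge (actions : List String) (action : String) (j : Nat) :
    j ≤ pvSegEnd actions action j := by
  fun_induction pvSegEnd actions action j with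
  | case1 j h ih => omega
  | case2 j h => omega

-- outer while loop of A, carrying the keyframe accumulator
def pvLoopA (actions : List String) (i : Nat) (acc : List Int) : List Int :=
  if h : i < actions.length then
    let action := actions.getD i ""
    if action = "None" then pvLoopA actions (i + 1) acc
    else
      let j := pvSegEnd actions action (i + 1)
      let segment_end : Int := (j : Int) - 1
      let acc' := if PySem.Str.startswith (PySem.Str.lower action) "look"
                  then acc ++ [segment_end] else acc
      pvLoopA actions j acc'
  else acc
termination_by actions.length - i
decreasing_by
  · omega
  · have := pvSegEnd_ge actions (actions.getD i "") (i + 1); omega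

def get_bin_search_keyframes (actions : List String) : List Int :=
  if actions = [] then []
  else pvLoopA actions (pvSkipNone actions 0) []

-- ===== PORT B =====
-- the comprehension's condition: i is the last index of its run and the action is a "look"
def pvIsKeep (actions : List String) (n i : Nat) : Bool :=
  (i == n - 1 || actions.getD (i + 1) "" != actions.getD i "")
  && actions.getD i "" != "None"
  && PySem.Str.startswith (PySem.Str.lower (actions.getD i "")) "look"

def get_bin_search_keyframes_alt (actions : List String) : List Int :=
  let n := actions.length
  ((List.range n).filter (pvIsKeep actions n)).map Int.ofNat

-- ===== PRECONDITION & SPEC =====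
def Spec_get_bin_search_keyframes (actions : List String) (out : List Int) : Prop := out = get_bin_search_keyframes_alt actions
instance (actions : List String) (out : List Int) : Decidable (Spec_get_bin_search_keyframes actions out) := by unfold Spec_get_bin_search_keyframes; infer_instance

-- ===== CLAIM (what is proved, stated in full; the proofs are below) =====
def Claim_equal_get_bin_search_keyframes : Prop := ∀ (actions : List String), Dom_get_bin_search_keyframes actions → Spec_get_bin_search_keyframes actions (get_bin_search_keyframes actions)

-- ===== LEMMAS AND PROOFS =====

-- the B-side result restricted to indices ≥ i
def pvSuffix (actions : List String) (i : Nat) : List Int :=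
  ((List.range' i (actions.length - i)).filter (pvIsKeep actions actions.length)).map Int.ofNat

theorem pvSegEnd_le (actions : List String) (action : String) (j : Nat)
    (hj : j ≤ actions.length) : pvSegEnd actions action j ≤ actions.length := by
  fun_induction pvSegEnd actions action j with
  | case1 j h ih => exact ih (by omega)
  | case2 j h => exact hj

theorem pvSegEnd_eq_all (actions : List String) (action : String) (j k : Nat)
    (h1 : j ≤ k) (h2 : k < pvSegEnd actions action j) :
    actions.getD k "" = action := by
  fun_induction pvSegEnd actions action j with
  | case1 j h ih =>
    rcases Nat.eq_or_lt_of_le h1 with rfl | hlt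
    · exact h.2
    · exact ih (by omega) h2
  | case2 j h => omega

theorem pvSegEnd_stop (actions : List String) (action : String) (j : Nat)
    (h : pvSegEnd actions action j < actions.length) :
    actions.getD (pvSegEnd actions action j) "" ≠ action := by
  fun_induction pvSegEnd actions action j with
  | case1 j h' ih => exact ih h
  | case2 j h' =>
    intro hc
    exact h' ⟨h, hc⟩

theorem pvSkipNone_loop (actions : List String) (i : Nat) (acc : List Int) :
    pvLoopA actions (pvSkipNone actions i) acc = pvLoopA actions i acc := by
  fun_induction pvSkipNone actions i with
  | case1 i h ih =>
    rw [ih]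
    conv_rhs => rw [pvLoopA]
    rw [dif_pos h.1, if_pos h.2]
  | case2 i h => rfl

theorem pvSuffix_split (actions : List String) (i j : Nat) (hij : i ≤ j)
    (hjn : j ≤ actions.length) :
    pvSuffix actions i
      = (((List.range' i (j - i)).filter (pvIsKeep actions actions.length)).map Int.ofNat)
        ++ pvSuffix actions j := by
  unfold pvSuffix
  rw [show actions.length - i = (j - i) + (actions.length - j) from by omega,
     ← List.range'_append_1, show i + (j - i) = j from by omega,
     List.filter_append, List.map_append]

theorem pvKeep_false_of_none (actions : List String) (k : Nat)
    (h : actions.getD k "" = "None") :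
    pvIsKeep actions actions.length k = false := by
  unfold pvIsKeep
  rw [h]
  simp

theorem pvKeep_false_of_mid (actions : List String) (k : Nat) (action : String)
    (h1 : actions.getD k "" = action) (h2 : actions.getD (k + 1) "" = action)
    (h3 : k + 1 < actions.length) :
    pvIsKeep actions actions.length k = false := by
  unfold pvIsKeep
  rw [h1, h2]
  have hne : (k == actions.length - 1) = false := by
    simp
    omega
  rw [hne]
  simp

theorem pvLoopA_suffix (actions : List String) (i : Nat) (acc : List Int) :
    pvLoopA actions i acc = acc ++ pvSuffix actions i := by
  fun_induction pvLoopA actions i acc with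
  | case1 i acc h action haN ih =>
    rw [ih]
    congr 1
    rw [pvSuffix_split actions i (i + 1) (by omega) (by omega)]
    have hk : pvIsKeep actions actions.length i = false :=
      pvKeep_false_of_none actions i haN
    simp [show i + 1 - i = 1 from by omega, List.range'_one, hk]
  | case2 i acc h action haN j segment_end acc' ih =>
    rw [ih]
    have hj1 : i + 1 ≤ j := pvSegEnd_ge actions action (i + 1)
    have hjn : j ≤ actions.length := pvSegEnd_le actions action (i + 1) (by omega)
    have hall : ∀ k, i ≤ k → k < j → actions.getD k "" = action := by
      intro k hk1 hk2
      rcases Nat.eq_or_lt_of_le hk1 with rfl | hlt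
      · rfl
      · exact pvSegEnd_eq_all actions action (i + 1) k (by omega) hk2
    rw [pvSuffix_split actions i j (by omega) hjn]
    -- the run [i, j): the condition holds exactly at j - 1, and there it is the look test
    have hseg : (List.range' i (j - i)).filter (pvIsKeep actions actions.length)
        = if PySem.Str.startswith (PySem.Str.lower action) "look" then [j - 1] else [] := by
      have hsplit2 : List.range' i (j - i) = List.range' i (j - 1 - i) ++ [j - 1] := by
        rw [show j - i = (j - 1 - i) + 1 from by omega, ← List.range'_append_1,
           List.range'_one, show i + (j - 1 - i) = j - 1 from by omega]
      rw [hsplit2, List.filter_append]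
      have hfalse : (List.range' i (j - 1 - i)).filter (pvIsKeep actions actions.length) = [] := by
        rw [List.filter_eq_nil_iff]
        intro k hk
        rw [List.mem_range'_1] at hk
        simp [pvKeep_false_of_mid actions k action (hall k hk.1 (by omega))
          (hall (k + 1) (by omega) (by omega)) (by omega)]
      rw [hfalse]
      have h1 : actions.getD (j - 1) "" = action := hall (j - 1) (by omega) (by omega)
      have hkj : pvIsKeep actions actions.length (j - 1)
          = PySem.Str.startswith (PySem.Str.lower action) "look" := by
        unfold pvIsKeep
        rw [h1]
        have hrunend : ((j - 1 == actions.length - 1)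
            || (actions.getD (j - 1 + 1) "" != action)) = true := by
          rcases Nat.eq_or_lt_of_le hjn with heq | hlt
          · rw [heq]
            simp
          · have hst : actions.getD j "" ≠ action := pvSegEnd_stop actions action (i + 1) hlt
            have hb : (actions.getD j "" != action) = true := by
              rw [bne_iff_ne]
              exact hst
            rw [show j - 1 + 1 = j from by omega, hb, Bool.or_true]
        rw [hrunend]
        simp [haN]
      simp only [List.filter_cons, List.filter_nil, hkj]
      split <;> simp
    rw [hseg]
    have hacc : acc' = acc ++ (if PySem.Str.startswith (PySem.Str.lower action) "look"
        then [j - 1] else [] : List Nat).map Int.ofNat := by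
      simp only [acc', segment_end]
      split
      · simp
        omega
      · simp
    rw [hacc, List.append_assoc]
  | case3 i acc h =>
    rw [show pvSuffix actions i = [] from by unfold pvSuffix; simp [show actions.length - i = 0 from by omega]]
    simp

-- ===== VERDICT (by name: the statement is the Claim_ definition above) =====
theorem get_bin_search_keyframes_spec : Claim_equal_get_bin_search_keyframes := by
  intro actions _
  unfold Spec_get_bin_search_keyframes get_bin_search_keyframes get_bin_search_keyframes_alt
  split
  · subst actions; simp
  · rw [pvSkipNone_loop, pvLoopA_suffix]
    unfold pvSuffix
    simp [List.range_eq_range']
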